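-- pv_equiv track=rewrite | github.com/PeterCullenBurbery/advent-of-code-2025 | python/Advent_of_code_2025_002_002.py | generate_all_repeated_numbers_up_to
-- ===== SOURCE A (Python) =====
-- def get_digits_count(x: int) -> int:
--     if x == 0:
--         return 1
--     return len(str(x))
--
-- def generate_all_repeated_numbers_up_to(max_val: int) -> list[int]:
--     """
--     Generates all numbers <= max that are formed by repeating a block of digits.
--     Example: 1212 (block 12 repeated twice), 111 (block 1 repeated thrice).
--     """
--     if max_val < 11:
--         return []
--
--     max_digits = get_digits_count(max_val)
--     # Precompute powers of 10
--     pow10 = [10**i for i in range(max_digits + 1)]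
--
--     results = set() # Use a set to handle deduplication automatically (e.g., 1111)
--
--     # n: total length, k: block length, t: repetition count
--     for n in range(2, max_digits + 1):
--         for k in range(1, n):
--             if n % k != 0:
--                 continue
--
--             t = n // k
--             if t < 2:
--                 continue
--
--             start_x = pow10[k - 1]  # smallest k-digit number
--             end_x = pow10[k] - 1    # largest k-digit number
--
--             for x in range(start_x, end_x + 1):
--                 # Build the repeated number string-wise or math-wise
--                 # Math-wise to match Java logic:
--                 v = 0
--                 block_pow = pow10[k]
--                 for _ in range(t):
--                     v = v * block_pow + x
--
--                 if v > max_val: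
--                     # For a fixed n, k, t, v increases with x
--                     break
--
--                 results.add(v)
--
--     return sorted(list(results))
-- ===== SOURCE B (Python) =====
-- def generate_all_repeated_numbers_up_to(max_val: int) -> list[int]:
--     """
--     Generates all numbers <= max that are formed by repeating a block of digits.
--     Single loop over successive block values: repeat each block while the
--     repeated number stays <= max_val; stop as soon as even the doubled block
--     exceeds max_val (the doubled block grows with x).
--     """
--     results = set()
--     x = 1
--     while True:
--         p = 10
--         while p <= x:
--             p *= 10
--         v = x * p + x          # block repeated twice
--         if v > max_val:
--             break
--         while v <= max_val:
--             results.add(v)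
--             v = v * p + x
--         x += 1
--     return sorted(results)
-- ===== Notes on version B (the rewrite author's own statement) =====
-- stated objective: alternative
-- what changed: Replaces A's enumeration over (total length, divisor block length, repetition count) with the pow10 table by a single loop over successive block values that repeats each block while the result stays <= max_val and stops once even the doubled block exceeds max_val.
import Mathlib
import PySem

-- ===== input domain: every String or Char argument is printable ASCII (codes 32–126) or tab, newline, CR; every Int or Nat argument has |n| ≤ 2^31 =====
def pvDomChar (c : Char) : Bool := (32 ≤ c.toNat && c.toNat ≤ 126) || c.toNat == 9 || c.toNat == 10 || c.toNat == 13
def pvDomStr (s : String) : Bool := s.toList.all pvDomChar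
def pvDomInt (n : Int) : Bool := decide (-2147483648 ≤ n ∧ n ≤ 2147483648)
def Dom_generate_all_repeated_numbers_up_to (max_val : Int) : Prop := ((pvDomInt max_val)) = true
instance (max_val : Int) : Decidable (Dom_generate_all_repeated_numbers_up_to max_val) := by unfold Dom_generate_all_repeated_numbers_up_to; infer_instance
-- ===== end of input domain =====

-- B replaces A's (total length, block length, repetition) divisor enumeration with a single
-- loop over block values, repeating each block while the result stays ≤ max_val (objective:
-- alternative decomposition; same return value everywhere).

-- ===== PORT A =====
def get_digits_count (x : Int) : Int :=
  if x = 0 then 1 else PySem.Str.len (PySem.Int.toStr x)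

-- the 'for x in range(start_x, end_x + 1)' loop with its break
def aXLoop (max_val block_pow t : Int) : List Int → PySem.Set Int → PySem.Set Int
  | [], res => res
  | x :: rest, res =>
    let v := (PySem.List.pyRange 0 t 1).foldl (fun v _ => v * block_pow + x) 0
    if v > max_val then res
    else aXLoop max_val block_pow t rest (res.add v)

def generate_all_repeated_numbers_up_to (max_val : Int) : List Int :=
  if max_val < 11 then []
  else
    let max_digits := get_digits_count max_val
    -- 10**i with i ≥ 0 over range(max_digits+1): exact as 10 ^ i.toNat
    let pow10 : List Int := (PySem.List.pyRange 0 (max_digits + 1) 1).map (fun i => 10 ^ i.toNat)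
    let results : PySem.Set Int :=
      (PySem.List.pyRange 2 (max_digits + 1) 1).foldl (fun res n =>
        (PySem.List.pyRange 1 n 1).foldl (fun res k =>
          if PySem.Int.mod n k ≠ 0 then res
          else
            let t := PySem.Int.floordiv n k
            if t < 2 then res
            else
              -- pow10[k-1] / pow10[k]: indices provably in range (1 ≤ k < n ≤ max_digits), default never used
              let start_x := PySem.List.pyGetD pow10 (k - 1) 0
              let end_x := PySem.List.pyGetD pow10 k 0 - 1
              aXLoop max_val (PySem.List.pyGetD pow10 k 0) t
                (PySem.List.pyRange start_x (end_x + 1) 1) res) res)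
        PySem.Set.empty
    PySem.List.sorted results (fun v => v) false

-- ===== PORT B =====
-- small term-mode facts the ports' termination/positivity arguments cite
theorem pv_ten_pos : (0:Int) < 10 := by decide
theorem pv_mul_ten_pos (p : Int) (hp : 0 < p) : 0 < p * 10 := mul_pos hp (by decide)
theorem pv_toNat_lt (m a b : Int) (hab : b < a) (hbm : b ≤ m) :
    (m + 1 - a).toNat < (m + 1 - b).toNat :=
  (Int.toNat_lt_toNat (sub_pos.mpr (Int.lt_add_one_iff.mpr hbm))).mpr (sub_lt_sub_left hab (m+1))
theorem pv_step_pos (p x v : Int) (hp : 1 < p) (hx : 0 < x) (hv : 0 < v) : 0 < v * p + x :=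
  add_pos (mul_pos hv (lt_trans zero_lt_one hp)) hx
theorem pv_step_gt (p x v : Int) (hp : 1 < p) (hx : 0 < x) (hv : 0 < v) : v < v * p + x :=
  lt_add_of_lt_of_pos (lt_mul_of_one_lt_right hv hp) hx

-- 'p = 10; while p <= x: p *= 10' (proof argument 0 < p only justifies termination)
def bPowLoop (x : Int) (p : Int) (hp : 0 < p) : Int :=
  if h : p ≤ x then bPowLoop x (p * 10) (pv_mul_ten_pos p hp) else p
termination_by (x + 1 - p).toNat
decreasing_by exact pv_toNat_lt x (p * 10) p (lt_mul_of_one_lt_right hp (by decide)) h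

-- lemma used for bOuter's proof arguments (result of bPowLoop is ≥ its start)
theorem bPowLoop_ge (x : Int) (p : Int) (hp : 0 < p) : p ≤ bPowLoop x p hp := by
  fun_induction bPowLoop x p hp with
  | case1 p hp h ih => exact le_trans (le_mul_of_one_le_right hp.le (by decide)) ih
  | case2 p hp h => exact le_refl p

theorem pv_pw_gt_one (x : Int) : 1 < bPowLoop x 10 pv_ten_pos :=
  lt_of_lt_of_le (by decide) (bPowLoop_ge x 10 pv_ten_pos)
theorem pv_outer_le (m x q : Int) (hx : 0 < x) (hq : 1 < q) (h : ¬ x * q + x > m) : x ≤ m :=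
  le_trans (le_add_of_nonneg_left (mul_nonneg hx.le (le_of_lt (lt_trans zero_lt_one hq)))) (not_lt.mp h)

-- 'while v <= max_val: results.add(v); v = v*p + x'
def bInner (max_val p x : Int) (hp : 1 < p) (hx : 0 < x) (v : Int) (hv : 0 < v)
    (res : PySem.Set Int) : PySem.Set Int :=
  if h : v ≤ max_val then
    bInner max_val p x hp hx (v * p + x) (pv_step_pos p x v hp hx hv) (res.add v)
  else res
termination_by (max_val + 1 - v).toNat
decreasing_by exact pv_toNat_lt max_val (v * p + x) v (pv_step_gt p x v hp hx hv) h

-- the outer 'while True' loop over successive block values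
def bOuter (max_val : Int) (x : Int) (hx : 0 < x) (res : PySem.Set Int) : PySem.Set Int :=
  let p := bPowLoop x 10 pv_ten_pos
  if h : x * p + x > max_val then res
  else
    bOuter max_val (x + 1) (add_pos hx zero_lt_one)
      (bInner max_val p x (pv_pw_gt_one x) hx (x * p + x)
        (pv_step_pos p x x (pv_pw_gt_one x) hx hx) res)
termination_by (max_val + 1 - x).toNat
decreasing_by exact pv_toNat_lt max_val (x + 1) x (lt_add_one x) (pv_outer_le max_val x p hx (pv_pw_gt_one x) h)

def generate_all_repeated_numbers_up_to_alt (max_val : Int) : List Int :=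
  PySem.List.sorted (bOuter max_val 1 Int.one_pos PySem.Set.empty) (fun v => v) false

-- ===== PRECONDITION & SPEC =====
def Spec_generate_all_repeated_numbers_up_to (max_val : Int) (out : List Int) : Prop := out = generate_all_repeated_numbers_up_to_alt max_val
instance (max_val : Int) (out : List Int) : Decidable (Spec_generate_all_repeated_numbers_up_to max_val out) := by unfold Spec_generate_all_repeated_numbers_up_to; infer_instance

-- ===== CLAIM =====
def Claim_equal_generate_all_repeated_numbers_up_to : Prop := ∀ (max_val : Int), Dom_generate_all_repeated_numbers_up_to max_val → Spec_generate_all_repeated_numbers_up_to max_val (generate_all_repeated_numbers_up_to max_val)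

-- ===== LEMMAS AND PROOFS =====

-- the value of block x (with block power bp) repeated t times
def pvRep (bp x : Int) : Nat → Int
  | 0 => 0
  | t + 1 => pvRep bp x t * bp + x

-- the common membership predicate: v is some block of exactly k digits repeated t ≥ 2 times, v ≤ maxv
def pvP (maxv v : Int) : Prop :=
  ∃ (k t : Nat) (x : Int), 1 ≤ k ∧ 2 ≤ t ∧ 10 ^ (k - 1) ≤ x ∧ x < 10 ^ k ∧
    v = pvRep (10 ^ k) x t ∧ v ≤ maxv

theorem pvRep_ge_x (bp x : Int) (hbp : 1 ≤ bp) (hx : 0 < x) :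
    ∀ t, 1 ≤ t → x ≤ pvRep bp x t := by
  intro t ht
  induction t with
  | zero => omega
  | succ t ih =>
    rcases Nat.eq_zero_or_pos t with rfl | ht'
    · simp [pvRep]
    · have h1 : x ≤ pvRep bp x t := ih ht'
      have : pvRep bp x t ≤ pvRep bp x t * bp := by nlinarith
      simp only [pvRep]; omega

theorem pvRep_mono_t (bp x : Int) (hbp : 1 ≤ bp) (hx : 0 < x) :
    ∀ t t', 1 ≤ t → t ≤ t' → pvRep bp x t ≤ pvRep bp x t' := by
  intro t t' ht h
  induction t' with
  | zero => omega
  | succ t' ih =>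
    cases Nat.eq_or_lt_of_le h with
    | inl h' => rw [h']
    | inr h' =>
      have h1 := ih (by omega)
      have h2 : x ≤ pvRep bp x t' := pvRep_ge_x bp x hbp hx t' (by omega)
      have : pvRep bp x t' ≤ pvRep bp x t' * bp := by nlinarith
      simp only [pvRep]; omega

theorem pvRep_eq_mul_geom (bp x : Int) :
    ∀ t, pvRep bp x t = x * (Finset.range t).sum (fun i => bp ^ i) := by
  intro t
  induction t with
  | zero => simp [pvRep]
  | succ t ih =>
    rw [pvRep, ih, geom_sum_succ]
    ring

theorem pvRep_mono_x (bp : Int) (t : Nat) (ht : 1 ≤ t) (hbp : 0 ≤ bp) :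
    ∀ x y : Int, x ≤ y → pvRep bp x t ≤ pvRep bp y t := by
  intro x y hxy
  rw [pvRep_eq_mul_geom, pvRep_eq_mul_geom]
  have hpos : (0:Int) < (Finset.range t).sum (fun i => bp ^ i) := by
    have : ∀ i ∈ Finset.range t, (0:Int) ≤ bp ^ i := fun i _ => pow_nonneg hbp i
    calc (0:Int) < 1 := by omega
    _ ≤ _ := by
      have h0 : (0:Nat) ∈ Finset.range t := by simp; omega
      calc (1:Int) = bp ^ 0 := by simp
      _ ≤ _ := Finset.single_le_sum this h0
  nlinarith

theorem pvRep_lower (k t : Nat) (x : Int) (hk : 1 ≤ k) (ht : 1 ≤ t) (hx : 10 ^ (k-1) ≤ x) :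
    (10:Int) ^ (k * t - 1) ≤ pvRep (10 ^ k) x t := by
  induction t with
  | zero => omega
  | succ t ih =>
    rcases Nat.eq_zero_or_pos t with rfl | h
    · simpa [pvRep] using hx
    · have h1 := ih h
      have hx0 : (0:Int) < x := lt_of_lt_of_le (by positivity) hx
      simp only [pvRep]
      have : (10:Int) ^ (k * t - 1) * 10 ^ k ≤ pvRep (10 ^ k) x t * 10 ^ k := by
        have : (0:Int) < 10 ^ k := by positivity
        nlinarith
      have heq : (10:Int) ^ (k * t - 1) * 10 ^ k = 10 ^ (k * (t+1) - 1) := by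
        rw [← pow_add]
        congr 1
        have h1 : 1 ≤ k * t := Nat.one_le_iff_ne_zero.mpr (Nat.mul_ne_zero (by omega) (by omega))
        rw [Nat.mul_succ]
        omega
      omega

-- generic membership through a foldl whose body adds exactly the elements satisfying Q
theorem pvFoldlMem (f : PySem.Set Int → Int → PySem.Set Int) (Q : Int → Int → Prop) :
    ∀ (l : List Int), (∀ res k v, k ∈ l → (v ∈ f res k ↔ v ∈ res ∨ Q k v)) →
      ∀ (res : PySem.Set Int) (v : Int),
        (v ∈ l.foldl f res ↔ v ∈ res ∨ ∃ k ∈ l, Q k v) := by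
  intro l
  induction l with
  | nil => simp
  | cons a l ih =>
    intro hf res v
    simp only [List.foldl_cons]
    rw [ih (fun res k v hk => hf res k v (List.mem_cons_of_mem a hk)),
      hf res a v (List.mem_cons_self)]
    simp only [List.mem_cons]
    constructor
    · rintro ((h | h) | ⟨k, hk, hq⟩)
      · exact Or.inl h
      · exact Or.inr ⟨a, Or.inl rfl, h⟩
      · exact Or.inr ⟨k, Or.inr hk, hq⟩
    · rintro (h | ⟨k, (rfl | hk), hq⟩)
      · exact Or.inl (Or.inl h)
      · exact Or.inl (Or.inr hq)
      · exact Or.inr ⟨k, hk, hq⟩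

theorem pvFoldlNodup (f : PySem.Set Int → Int → PySem.Set Int)
    (hf : ∀ res k, res.Nodup → (f res k).Nodup) :
    ∀ (l : List Int) (res : PySem.Set Int), res.Nodup → (l.foldl f res).Nodup := by
  intro l
  induction l with
  | nil => intro res h; simpa
  | cons a l ih => intro res h; exact ih _ (hf res a h)

-- A's inner t-fold computes pvRep
theorem pvFoldRep (bp x : Int) (t : Int) (ht : 0 ≤ t) :
    (PySem.List.pyRange 0 t 1).foldl (fun v _ => v * bp + x) 0 = pvRep bp x t.toNat := by
  have key : ∀ (l : List Int) (m : Nat),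
      l.foldl (fun v _ => v * bp + x) (pvRep bp x m) = pvRep bp x (m + l.length) := by
    intro l
    induction l with
    | nil => simp
    | cons a l ih =>
      intro m
      have : pvRep bp x m * bp + x = pvRep bp x (m+1) := rfl
      simp only [List.foldl_cons, this, ih, List.length_cons]
      congr 1; omega
  have h0 : (0:Int) = pvRep bp x 0 := rfl
  rw [h0, key, PySem.List.length_pyRange_one]
  congr 1; omega

-- ===== A side =====

theorem aXLoop_mem_aux (maxv bp t : Int) (hbp : 0 ≤ bp) (ht : 1 ≤ t) (e : Int) :
    ∀ (n : Nat) (s : Int) (res : PySem.Set Int) (v : Int), (e - s).toNat = n →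
      (v ∈ aXLoop maxv bp t (PySem.List.pyRange s e 1) res ↔
        v ∈ res ∨ ∃ x : Int, s ≤ x ∧ x < e ∧ pvRep bp x t.toNat ≤ maxv ∧ v = pvRep bp x t.toNat) := by
  intro n
  induction n with
  | zero =>
    intro s res v hn
    rw [PySem.List.pyRange_one_eq_nil (by omega)]
    simp only [aXLoop]
    constructor
    · exact Or.inl
    · rintro (h | ⟨x, h1, h2, _⟩)
      · exact h
      · omega
  | succ n ih =>
    intro s res v hn
    have hse : s < e := by omega
    rw [PySem.List.pyRange_one_cons hse]
    simp only [aXLoop, pvFoldRep bp s t (by omega)]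
    split
    · -- v0 > maxv : break; nothing with x ≥ s qualifies
      rename_i hbreak
      constructor
      · exact Or.inl
      · rintro (h | ⟨x, h1, h2, h3, h4⟩)
        · exact h
        · have := pvRep_mono_x bp t.toNat (by omega) hbp s x h1
          omega
    · rename_i hkeep
      rw [ih (s + 1) (res.add (pvRep bp s t.toNat)) v (by omega)]
      rw [PySem.Set.mem_add]
      constructor
      · rintro ((h | h) | ⟨x, h1, h2, h3, h4⟩)
        · exact Or.inl h
        · exact Or.inr ⟨s, le_refl s, hse, by omega, h⟩
        · exact Or.inr ⟨x, by omega, h2, h3, h4⟩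
      · rintro (h | ⟨x, h1, h2, h3, h4⟩)
        · exact Or.inl (Or.inl h)
        · rcases eq_or_lt_of_le h1 with rfl | hlt
          · exact Or.inl (Or.inr h4)
          · exact Or.inr ⟨x, by omega, h2, h3, h4⟩

theorem aXLoop_mem (maxv bp t : Int) (hbp : 0 ≤ bp) (ht : 1 ≤ t) (e s : Int)
    (res : PySem.Set Int) (v : Int) :
    v ∈ aXLoop maxv bp t (PySem.List.pyRange s e 1) res ↔
      v ∈ res ∨ ∃ x : Int, s ≤ x ∧ x < e ∧ pvRep bp x t.toNat ≤ maxv ∧ v = pvRep bp x t.toNat :=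
  aXLoop_mem_aux maxv bp t hbp ht e (e - s).toNat s res v rfl

theorem aXLoop_nodup (maxv bp t : Int) :
    ∀ (l : List Int) (res : PySem.Set Int), res.Nodup → (aXLoop maxv bp t l res).Nodup := by
  intro l
  induction l with
  | nil => intro res h; simpa [aXLoop]
  | cons a l ih =>
    intro res h
    simp only [aXLoop]
    split
    · exact h
    · exact ih _ (PySem.Set.nodup_add _ _ h)

theorem bInner_mem (maxv p x : Int) (hp : 1 < p) (hx : 0 < x) :
    ∀ (n : Nat) (v0 : Int) (hv0 : 0 < v0) (t0 : Nat), 1 ≤ t0 → v0 = pvRep p x t0 →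
      (maxv + 1 - v0).toNat = n →
      ∀ (res : PySem.Set Int) (v : Int),
        (v ∈ bInner maxv p x hp hx v0 hv0 res ↔
          v ∈ res ∨ ∃ t : Nat, t0 ≤ t ∧ v = pvRep p x t ∧ pvRep p x t ≤ maxv) := by
  intro n
  induction n using Nat.strong_induction_on with
  | _ n ih =>
    intro v0 hv0 t0 ht0 hrep hn res v
    rw [bInner]
    split
    · rename_i hle
      have hstep : v0 * p + x = pvRep p x (t0 + 1) := by rw [hrep]; rfl
      have hlt : v0 < v0 * p + x := by nlinarith
      rw [ih (maxv + 1 - (v0 * p + x)).toNat (by omega) (v0 * p + x) (by nlinarith)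
        (t0 + 1) (by omega) hstep rfl]
      rw [PySem.Set.mem_add]
      constructor
      · rintro ((h | h) | ⟨t, h1, h2, h3⟩)
        · exact Or.inl h
        · exact Or.inr ⟨t0, le_refl _, by omega, by omega⟩
        · exact Or.inr ⟨t, by omega, h2, h3⟩
      · rintro (h | ⟨t, h1, h2, h3⟩)
        · exact Or.inl (Or.inl h)
        · rcases Nat.eq_or_lt_of_le h1 with rfl | hlt'
          · exact Or.inl (Or.inr (by omega))
          · exact Or.inr ⟨t, by omega, h2, h3⟩
    · rename_i hgt
      constructor
      · exact Or.inl
      · rintro (h | ⟨t, h1, h2, h3⟩)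
        · exact h
        · have := pvRep_mono_t p x (by omega) hx t0 t ht0 h1
          omega

theorem bInner_nodup (maxv p x : Int) (hp : 1 < p) (hx : 0 < x) :
    ∀ (v0 : Int) (hv0 : 0 < v0) (res : PySem.Set Int), res.Nodup →
      (bInner maxv p x hp hx v0 hv0 res).Nodup := by
  intro v0 hv0 res
  fun_induction bInner maxv p x hp hx v0 hv0 res with
  | case1 v hv res h ih =>
    intro hres
    exact ih (PySem.Set.nodup_add _ _ hres)
  | case2 => exact id

def pvPw (y : Int) : Int := bPowLoop y 10 pv_ten_pos

theorem bPowLoop_spec (x : Int) :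
    ∀ (p : Int) (hp : 0 < p), (∃ j : Nat, p = 10 ^ (j+1) ∧ 10 ^ j ≤ x) →
      ∃ k : Nat, 1 ≤ k ∧ bPowLoop x p hp = 10 ^ k ∧ 10 ^ (k-1) ≤ x ∧ x < 10 ^ k := by
  intro p hp
  fun_induction bPowLoop x p hp with
  | case1 p hp h ih =>
    rintro ⟨j, rfl, hj⟩
    exact ih ⟨j+1, by ring, h⟩
  | case2 p hp h =>
    rintro ⟨j, rfl, hj⟩
    exact ⟨j+1, by omega, rfl, by simpa using hj, by omega⟩

theorem pvPw_spec (x : Int) (hx : 1 ≤ x) :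
    ∃ k : Nat, 1 ≤ k ∧ pvPw x = 10 ^ k ∧ 10 ^ (k-1) ≤ x ∧ x < 10 ^ k :=
  bPowLoop_spec x 10 (by omega) ⟨0, by norm_num, by simpa using hx⟩

theorem pvPw_ge (x : Int) : (10:Int) ≤ pvPw x := bPowLoop_ge x 10 pv_ten_pos

theorem pow_lt_pow_exp (n m : Nat) (h : (10:Int)^n < 10^m) : n < m := by
  by_contra hc
  exact absurd (pow_le_pow_right₀ (by norm_num : (1:Int) ≤ 10) (by omega : m ≤ n)) (by omega)

theorem pvPw_mono (x y : Int) (hx : 1 ≤ x) (hxy : x ≤ y) : pvPw x ≤ pvPw y := by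
  obtain ⟨k, hk1, hpk, hk2, hk3⟩ := pvPw_spec x hx
  obtain ⟨k', hk1', hpk', hk2', hk3'⟩ := pvPw_spec y (by omega)
  rw [hpk, hpk']
  have h1 : (10:Int) ^ (k-1) < 10 ^ k' := by omega
  have := pow_lt_pow_exp _ _ h1
  exact pow_le_pow_right₀ (by norm_num) (by omega)

theorem pvRep_two (p y : Int) : pvRep p y 2 = y * p + y := by
  simp [pvRep]

theorem rep2_mono (x y : Int) (hx : 1 ≤ x) (hxy : x ≤ y) :
    x * pvPw x + x ≤ y * pvPw y + y := by
  have h1 := pvPw_mono x y hx hxy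
  have h2 := pvPw_ge x
  have : x * pvPw x ≤ y * pvPw y := by nlinarith
  omega

theorem bOuter_mem (maxv : Int) :
    ∀ (n : Nat) (x : Int) (hx : 0 < x), (maxv + 1 - x).toNat = n →
      ∀ (res : PySem.Set Int) (v : Int),
        (v ∈ bOuter maxv x hx res ↔ v ∈ res ∨ ∃ (y : Int) (t : Nat), x ≤ y ∧ 2 ≤ t ∧
          v = pvRep (pvPw y) y t ∧ v ≤ maxv) := by
  intro n
  induction n using Nat.strong_induction_on with
  | _ n ih =>
    intro x hx hn res v
    rw [bOuter]
    have hpw : bPowLoop x 10 pv_ten_pos = pvPw x := rfl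
    split
    · rename_i hbreak
      rw [hpw] at hbreak
      constructor
      · exact Or.inl
      · rintro (h | ⟨y, t, hy1, ht2, hv1, hv2⟩)
        · exact h
        · exfalso
          have hge := pvPw_ge y
          have h1 : pvRep (pvPw y) y 2 ≤ pvRep (pvPw y) y t :=
            pvRep_mono_t (pvPw y) y (by omega) (by omega) 2 t (by omega) ht2
          rw [pvRep_two] at h1
          have h2 := rep2_mono x y (by omega) hy1
          omega
    · rename_i hkeep
      rw [hpw] at hkeep
      have hple : (10:Int) ≤ pvPw x := pvPw_ge x
      have hxle : x ≤ maxv := by nlinarith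
      rw [ih (maxv + 1 - (x+1)).toNat (by omega) (x+1) (by omega) rfl]
      simp only [hpw]
      rw [bInner_mem maxv (pvPw x) x _ hx (maxv + 1 - (x * pvPw x + x)).toNat (x * pvPw x + x)
        _ 2 (by omega) (pvRep_two (pvPw x) x).symm rfl]
      constructor
      · rintro ((h | ⟨t, ht, hv1, hv2⟩) | ⟨y, t, hy, ht, hv1, hv2⟩)
        · exact Or.inl h
        · exact Or.inr ⟨x, t, le_refl _, ht, hv1, by omega⟩
        · exact Or.inr ⟨y, t, by omega, ht, hv1, hv2⟩
      · rintro (h | ⟨y, t, hy, ht, hv1, hv2⟩)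
        · exact Or.inl (Or.inl h)
        · rcases eq_or_lt_of_le hy with rfl | hlt
          · exact Or.inl (Or.inr ⟨t, ht, hv1, by omega⟩)
          · exact Or.inr ⟨y, t, by omega, ht, hv1, hv2⟩

theorem bOuter_nodup (maxv : Int) :
    ∀ (x : Int) (hx : 0 < x) (res : PySem.Set Int), res.Nodup → (bOuter maxv x hx res).Nodup := by
  intro x hx res
  fun_induction bOuter maxv x hx res with
  | case1 => exact id
  | case2 =>
    rename_i ih
    intro hres
    exact ih (bInner_nodup _ _ _ _ _ _ _ _ hres)


-- ===== A side: the set built by A's triple loop, and its membership =====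

-- A's result set, with the port's lets zeta-expanded (pvAUnfold below is rfl)
def pvASet (maxv D : Int) : PySem.Set Int :=
  (PySem.List.pyRange 2 (D + 1) 1).foldl (fun res n =>
    (PySem.List.pyRange 1 n 1).foldl (fun res k =>
      if PySem.Int.mod n k ≠ 0 then res
      else
        if PySem.Int.floordiv n k < 2 then res
        else
          aXLoop maxv (PySem.List.pyGetD ((PySem.List.pyRange 0 (D + 1) 1).map (fun i => (10:Int) ^ i.toNat)) k 0)
            (PySem.Int.floordiv n k)
            (PySem.List.pyRange
              (PySem.List.pyGetD ((PySem.List.pyRange 0 (D + 1) 1).map (fun i => (10:Int) ^ i.toNat)) (k - 1) 0)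
              ((PySem.List.pyGetD ((PySem.List.pyRange 0 (D + 1) 1).map (fun i => (10:Int) ^ i.toNat)) k 0 - 1) + 1) 1)
            res) res)
    PySem.Set.empty

theorem pvAUnfold (maxv : Int) : generate_all_repeated_numbers_up_to maxv =
    if maxv < 11 then []
    else PySem.List.sorted (pvASet maxv (get_digits_count maxv)) (fun v => v) false := rfl

theorem digitsBracket (m : Int) (hm : 11 ≤ m) :
    ∃ D : Nat, PySem.Str.len (PySem.Int.toStr m) = (D:Int) ∧ 2 ≤ D ∧
      (10:Int)^(D-1) ≤ m ∧ m < 10^D := by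
  have hlen : PySem.Str.len (PySem.Int.toStr m) = ((Nat.toDigits 10 m.toNat).length : Int) := by
    rw [PySem.Str.len_eq, PySem.Int.toList_toStr, PySem.Int.toChars, if_neg (by omega)]
  refine ⟨(Nat.toDigits 10 m.toNat).length, hlen, ?_, ?_, ?_⟩
  · by_contra h
    have hpos : 0 < (Nat.toDigits 10 m.toNat).length := Nat.length_toDigits_pos
    have := (Nat.length_toDigits_le_iff (b := 10) (n := m.toNat) (by norm_num) (by norm_num : 0 < 1)).mp (by omega)
    omega
  · have hD2 : 2 ≤ (Nat.toDigits 10 m.toNat).length := by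
      by_contra h
      have hpos : 0 < (Nat.toDigits 10 m.toNat).length := Nat.length_toDigits_pos
      have := (Nat.length_toDigits_le_iff (b := 10) (n := m.toNat) (by norm_num) (by norm_num : 0 < 1)).mp (by omega)
      omega
    have hnot : ¬ ((Nat.toDigits 10 m.toNat).length ≤ (Nat.toDigits 10 m.toNat).length - 1) := by omega
    have := (Nat.length_toDigits_le_iff (b := 10) (n := m.toNat) (by norm_num)
      (by omega : 0 < (Nat.toDigits 10 m.toNat).length - 1)).not.mp hnot
    have h2 : (10:Nat) ^ ((Nat.toDigits 10 m.toNat).length - 1) ≤ m.toNat := by omega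
    have := (Int.toNat_of_nonneg (by omega : (0:Int) ≤ m))
    calc (10:Int)^((Nat.toDigits 10 m.toNat).length - 1)
        = ((10^((Nat.toDigits 10 m.toNat).length - 1) : Nat) : Int) := by push_cast; ring
    _ ≤ (m.toNat : Int) := by exact_mod_cast h2
    _ = m := this
  · have h2 := (Nat.length_toDigits_le_iff (b := 10) (n := m.toNat) (by norm_num)
      (Nat.length_toDigits_pos)).mp (le_refl _)
    have := (Int.toNat_of_nonneg (by omega : (0:Int) ≤ m))
    calc m = (m.toNat : Int) := this.symm
    _ < ((10^((Nat.toDigits 10 m.toNat).length) : Nat) : Int) := by exact_mod_cast h2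
    _ = (10:Int)^((Nat.toDigits 10 m.toNat).length) := by push_cast; ring

theorem aSet_mem (maxv : Int) (D : Nat) (hhigh : maxv < 10^D) (v : Int) :
    v ∈ pvASet maxv (D:Int) ↔ pvP maxv v := by
  unfold pvASet
  rw [pvFoldlMem _
    (fun n v => ∃ k : Int, (1 ≤ k ∧ k < n) ∧ PySem.Int.mod n k = 0 ∧ 2 ≤ PySem.Int.floordiv n k ∧
      ∃ x : Int, 10 ^ (k.toNat - 1) ≤ x ∧ x < 10 ^ k.toNat ∧
        pvRep (10 ^ k.toNat) x (PySem.Int.floordiv n k).toNat ≤ maxv ∧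
        v = pvRep (10 ^ k.toNat) x (PySem.Int.floordiv n k).toNat)
    _]
  · constructor
    · rintro (h | ⟨n, hn, k, ⟨hk1, hk2⟩, hmod, hdiv, x, hx1, hx2, hrep, rfl⟩)
      · cases h
      · have hnmem := (PySem.List.mem_pyRange_one).mp hn
        exact ⟨k.toNat, (PySem.Int.floordiv n k).toNat, x, by omega, by omega, hx1, hx2, rfl, hrep⟩
    · rintro ⟨K, T, x, hK, hT, hx1, hx2, rfl, hle⟩
      refine Or.inr ⟨(K:Int) * (T:Int), ?_, (K:Int), ⟨by exact_mod_cast hK, ?_⟩, ?_, ?_, x, ?_, ?_, ?_, ?_⟩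
      · rw [PySem.List.mem_pyRange_one]
        constructor
        · have : T ≤ K * T := Nat.le_mul_of_pos_left T (by omega)
          exact_mod_cast le_trans (by exact_mod_cast hT) (by exact_mod_cast this)
        · -- K*T ≤ D from 10^(K*T-1) ≤ v ≤ maxv < 10^D
          have hlow := pvRep_lower K T x hK (by omega) hx1
          have hlt : (10:Int) ^ (K * T - 1) < 10 ^ D := by omega
          have := pow_lt_pow_exp _ _ hlt
          have : K * T ≤ D := by omega
          exact_mod_cast (by omega : ((K * T : Nat) : Int) < (D:Int) + 1)
      · -- K < K*T
        have : K * 2 ≤ K * T := Nat.mul_le_mul_left K hT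
        exact_mod_cast (by omega : ((K:Nat) : Int) < ((K * T : Nat) : Int))
      · rw [PySem.Int.mod_eq_zero_iff_dvd]
        exact dvd_mul_right _ _
      · rw [PySem.Int.floordiv_eq_ediv_of_pos (by exact_mod_cast hK : (0:Int) < K),
          Int.mul_ediv_cancel_left _ (by exact_mod_cast (by omega : K ≠ 0) : (K:Int) ≠ 0)]
        exact_mod_cast hT
      · simpa using hx1
      · simpa using hx2
      · rw [PySem.Int.floordiv_eq_ediv_of_pos (by exact_mod_cast hK : (0:Int) < K),
          Int.mul_ediv_cancel_left _ (by exact_mod_cast (by omega : K ≠ 0) : (K:Int) ≠ 0)]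
        simpa using hle
      · rw [PySem.Int.floordiv_eq_ediv_of_pos (by exact_mod_cast hK : (0:Int) < K),
          Int.mul_ediv_cancel_left _ (by exact_mod_cast (by omega : K ≠ 0) : (K:Int) ≠ 0)]
        simp
  · -- the outer fold body adds exactly the stated elements
    intro res n v hn
    have hnb := (PySem.List.mem_pyRange_one).mp hn
    rw [pvFoldlMem _
      (fun k v => PySem.Int.mod n k = 0 ∧ 2 ≤ PySem.Int.floordiv n k ∧
        ∃ x : Int, 10 ^ (k.toNat - 1) ≤ x ∧ x < 10 ^ k.toNat ∧
          pvRep (10 ^ k.toNat) x (PySem.Int.floordiv n k).toNat ≤ maxv ∧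
          v = pvRep (10 ^ k.toNat) x (PySem.Int.floordiv n k).toNat)
      _]
    · simp only [PySem.List.mem_pyRange_one]
    · intro res k v hk
      have hkb := (PySem.List.mem_pyRange_one).mp hk
      split
      · rename_i hmod
        constructor
        · exact Or.inl
        · rintro (h | ⟨h1, _⟩)
          · exact h
          · exact absurd h1 hmod
      · rename_i hmod
        split
        · rename_i hdiv
          constructor
          · exact Or.inl
          · rintro (h | ⟨_, h2, _⟩)
            · exact h
            · omega
        · rename_i hdiv
          have e2 : PySem.List.pyGetD ((PySem.List.pyRange 0 ((D:Int) + 1) 1).map (fun i => (10:Int) ^ i.toNat)) k 0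
              = 10 ^ k.toNat :=
            PySem.List.pyGetD_map_pyRange_of_nonneg _ _ _ _ (by omega) (by omega)
          have e1 : PySem.List.pyGetD ((PySem.List.pyRange 0 ((D:Int) + 1) 1).map (fun i => (10:Int) ^ i.toNat)) (k - 1) 0
              = 10 ^ (k - 1).toNat :=
            PySem.List.pyGetD_map_pyRange_of_nonneg _ _ _ _ (by omega) (by omega)
          rw [e1, e2]
          rw [aXLoop_mem maxv _ _ (by positivity) (by omega) _ _ res v]
          have ek : (k - 1).toNat = k.toNat - 1 := by omega
          rw [ek]
          constructor
          · rintro (h | ⟨x, h1, h2, h3, h4⟩)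
            · exact Or.inl h
            · exact Or.inr ⟨by simp [PySem.Int.mod_eq_zero_iff_dvd] at hmod ⊢; exact hmod,
                by omega, x, h1, by omega, h3, h4⟩
          · rintro (h | ⟨h1, h2, x, hx1, hx2, hx3, hx4⟩)
            · exact Or.inl h
            · exact Or.inr ⟨x, hx1, by omega, hx3, hx4⟩

theorem aSet_nodup (maxv D : Int) : (pvASet maxv D).Nodup := by
  unfold pvASet
  apply pvFoldlNodup _ _ _ _ List.nodup_nil
  intro res n hres
  apply pvFoldlNodup _ _ _ _ hres
  intro res k hres'
  split
  · exact hres'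
  · split
    · exact hres'
    · exact aXLoop_nodup _ _ _ _ _ hres'

-- every member of either set is at least 11
theorem pvP_lower_11 (maxv v : Int) (h : pvP maxv v) : 11 ≤ v := by
  obtain ⟨k, t, x, hk, ht, hx1, hx2, rfl, hle⟩ := h
  have hbp : (10:Int) ≤ 10 ^ k := by
    calc (10:Int) = 10 ^ 1 := (pow_one 10).symm
    _ ≤ 10 ^ k := pow_le_pow_right₀ (by norm_num) hk
  have hxpos : (1:Int) ≤ x := le_trans (one_le_pow₀ (by norm_num : (1:Int) ≤ 10)) hx1
  have h2 : pvRep (10 ^ k) x 2 ≤ pvRep (10 ^ k) x t :=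
    pvRep_mono_t _ _ (by omega) (by omega) 2 t (by omega) ht
  rw [pvRep_two] at h2
  nlinarith

theorem pow_bracket_unique (k k' : Nat) (x : Int) (hk : 1 ≤ k) (hk' : 1 ≤ k')
    (h1 : 10^(k-1) ≤ x) (h2 : x < 10^k) (h3 : 10^(k'-1) ≤ x) (h4 : x < 10^k') : k = k' := by
  rcases lt_trichotomy k k' with h | h | h
  · exfalso
    have : (10:Int)^k ≤ 10^(k'-1) := pow_le_pow_right₀ (by norm_num) (by omega)
    omega
  · exact h
  · exfalso
    have : (10:Int)^k' ≤ 10^(k-1) := pow_le_pow_right₀ (by norm_num) (by omega)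
    omega

theorem bSet_mem (maxv v : Int) :
    v ∈ bOuter maxv 1 Int.one_pos PySem.Set.empty ↔ pvP maxv v := by
  rw [bOuter_mem maxv (maxv + 1 - 1).toNat 1 (by omega) rfl]
  constructor
  · rintro (h | ⟨y, t, hy1, ht, rfl, hle⟩)
    · cases h
    · obtain ⟨k, hk1, hpk, hk2, hk3⟩ := pvPw_spec y hy1
      rw [hpk]
      exact ⟨k, t, y, hk1, ht, hk2, hk3, rfl, by rw [← hpk]; exact hle⟩
  · rintro ⟨K, T, x, hK, hT, hx1, hx2, rfl, hle⟩
    have hxpos : (1:Int) ≤ x := le_trans (one_le_pow₀ (by norm_num : (1:Int) ≤ 10)) hx1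
    obtain ⟨k0, hk01, hpk0, hk02, hk03⟩ := pvPw_spec x hxpos
    have heq : k0 = K := pow_bracket_unique k0 K x hk01 hK hk02 hk03 hx1 hx2
    subst heq
    exact Or.inr ⟨x, T, hxpos, hT, by rw [hpk0], hle⟩


-- ===== VERDICT =====
theorem generate_all_repeated_numbers_up_to_spec : Claim_equal_generate_all_repeated_numbers_up_to := by
  intro maxv _
  unfold Spec_generate_all_repeated_numbers_up_to
  rw [pvAUnfold, generate_all_repeated_numbers_up_to_alt]
  by_cases h11 : maxv < 11
  · rw [if_pos h11]
    have hempty : bOuter maxv 1 Int.one_pos PySem.Set.empty = [] := by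
      rw [List.eq_nil_iff_forall_not_mem]
      intro v hv
      have hp := (bSet_mem maxv v).mp hv
      have h1 := pvP_lower_11 maxv v hp
      obtain ⟨_, _, _, _, _, _, _, _, hle⟩ := hp
      omega
    rw [hempty]
    rfl
  · rw [if_neg h11]
    obtain ⟨D, hDeq, hD2, hlow, hhigh⟩ := digitsBracket maxv (by omega)
    have hgd : get_digits_count maxv = (D:Int) := by
      rw [get_digits_count, if_neg (by omega)]; exact hDeq
    rw [hgd]
    apply PySem.List.sorted_eq_sorted_of_perm _ _ _ (fun a b h => h)
    rw [List.perm_ext_iff_of_nodup (aSet_nodup maxv (D:Int))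
      (bOuter_nodup maxv 1 Int.one_pos PySem.Set.empty List.nodup_nil)]
    intro v
    rw [aSet_mem maxv D hhigh v, bSet_mem maxv v]
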